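-- pv_equiv track=rewrite | github.com/zhihao1998/gsma-evals | src/evals/netconfeval/utils.py | _parse_frr_sections
-- ===== SOURCE A (Python) =====
-- def _parse_frr_sections(config_text: str) -> dict[str, list[str]]:
--     """Parse FRRouting config into sections keyed by device name."""
--     devices: dict[str, list[str]] = {}
--     current_device = None
--     current_lines: list[str] = []
--
--     for line in config_text.split("\n"):
--         stripped = line.strip()
--         # Device headers like "# Device: router1" or "hostname router1"
--         if stripped.startswith("hostname "):
--             if current_device and current_lines:
--                 devices[current_device] = current_lines
--             current_device = stripped.split("hostname ", 1)[1].strip()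
--             current_lines = [stripped]
--         elif stripped and current_device:
--             current_lines.append(stripped)
--
--     if current_device and current_lines:
--         devices[current_device] = current_lines
--
--     return devices
-- ===== SOURCE B (Python) =====
-- def _parse_frr_sections(config_text: str) -> dict[str, list[str]]:
--     """Parse FRRouting config into sections keyed by device name."""
--     stripped = [ln.strip() for ln in config_text.split("\n")]
--     n = len(stripped)
--     devices: dict[str, list[str]] = {}
--     i = 0
--     # everything before the first header line is dropped
--     while i < n and not stripped[i].startswith("hostname "):
--         i += 1
--     # each header opens a block running up to the next header
--     while i < n:
--         header = stripped[i]
--         name = header.split("hostname ", 1)[1].strip()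
--         j = i + 1
--         body = []
--         while j < n and not stripped[j].startswith("hostname "):
--             if stripped[j]:
--                 body.append(stripped[j])
--             j += 1
--         devices[name] = [header] + body
--         i = j
--     return devices
-- ===== Notes on version B (the rewrite author's own statement) =====
-- stated objective: alternative
-- what changed: Replaces A's single stateful pass (current_device/current_lines accumulators with a trailing flush) by a strip-all-lines-first, skip-to-first-header, then block-at-a-time scan that slices each header's section out with an inner pointer and assigns it directly.
import Mathlib
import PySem

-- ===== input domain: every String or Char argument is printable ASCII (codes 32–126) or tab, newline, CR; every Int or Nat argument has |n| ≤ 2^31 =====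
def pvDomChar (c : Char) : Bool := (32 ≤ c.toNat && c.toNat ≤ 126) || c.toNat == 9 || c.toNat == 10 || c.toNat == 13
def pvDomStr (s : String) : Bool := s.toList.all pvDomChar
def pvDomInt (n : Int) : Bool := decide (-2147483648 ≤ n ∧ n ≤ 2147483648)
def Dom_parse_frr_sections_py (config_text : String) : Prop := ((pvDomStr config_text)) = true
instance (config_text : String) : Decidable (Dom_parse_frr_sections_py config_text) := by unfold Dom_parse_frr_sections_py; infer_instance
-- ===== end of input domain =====

-- B re-decomposes A's single stateful pass as: strip all lines, skip to the first
-- header, then cut out one header-delimited block at a time (objective: alternative).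


-- shared helper (both Pythons contain this very expression):
-- stripped.split("hostname ", 1)[1].strip().  Its callers guard with
-- startswith "hostname ", so the separator is nonempty and present and the
-- two getD defaults are unreachable (split? is some, index 1 exists).
def pvDevName (stripped : String) : String :=
  PySem.Str.strip (PySem.List.pyGetD ((PySem.Str.splitMax? stripped "hostname " 1).getD []) 1 "")

-- ===== PORT A =====
-- Python truthiness of `current_device` (None and "" are falsy)
def pvTruthy : Option String → Bool
  | none => false
  | some d => d != ""

def parse_frr_sections_py (config_text : String) : List (String × List String) :=
  -- config_text.split("\n"): the separator "\n" is nonempty, so split? is `some`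
  let lines := (PySem.Str.split? config_text "\n").getD []
  let st := lines.foldl
    (fun (st : PySem.Dict String (List String) × Option String × List String) line =>
      let stripped := PySem.Str.strip line
      if PySem.Str.startswith stripped "hostname " then
        let devices := if pvTruthy st.2.1 && !st.2.2.isEmpty
          then st.1.insert (st.2.1.getD "") st.2.2 else st.1
        (devices, some (pvDevName stripped), [stripped])
      else if stripped != "" && pvTruthy st.2.1 then
        (st.1, st.2.1, st.2.2 ++ [stripped])
      else st)
    (PySem.Dict.empty, none, [])
  (if pvTruthy st.2.1 && !st.2.2.isEmpty then st.1.insert (st.2.1.getD "") st.2.2 else st.1).items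

-- ===== PORT B =====
def pvIsHeader (s : String) : Bool := PySem.Str.startswith s "hostname "

-- Source B's first while loop: drop everything before the first header
def pvSkipPre : List String → List String
  | [] => []
  | s :: r => if pvIsHeader s then s :: r else pvSkipPre r

-- Source B's inner while loop: the non-empty body lines up to the next header,
-- together with the remainder of the line list (starting at that header)
def pvTakeBody : List String → List String × List String
  | [] => ([], [])
  | s :: r =>
    if pvIsHeader s then ([], s :: r)
    else
      let p := pvTakeBody r
      (if s != "" then s :: p.1 else p.1, p.2)

-- termination measure for pvBlocks (cited in its decreasing_by)
lemma pvTakeBody_rest_le : ∀ l : List String, (pvTakeBody l).2.length ≤ l.length := by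
  intro l
  induction l with
  | nil => simp [pvTakeBody]
  | cons s r ih =>
    simp only [pvTakeBody]
    split
    · simp
    · simpa using Nat.le_succ_of_le ih

-- Source B's outer while loop: the list starts at a header (or is empty); cut one block
def pvBlocks : PySem.Dict String (List String) → List String → PySem.Dict String (List String)
  | devices, [] => devices
  | devices, s :: r =>
    let p := pvTakeBody r
    pvBlocks (devices.insert (pvDevName s) (s :: p.1)) p.2
  termination_by _ l => l.length
  decreasing_by
    simpa using Nat.lt_succ_of_le (pvTakeBody_rest_le r)

def parse_frr_sections_py_alt (config_text : String) : List (String × List String) :=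
  let stripped := ((PySem.Str.split? config_text "\n").getD []).map PySem.Str.strip
  (pvBlocks PySem.Dict.empty (pvSkipPre stripped)).items

-- ===== PRECONDITION & SPEC =====
def Spec_parse_frr_sections_py (config_text : String) (out : List (String × List String)) : Prop := out = parse_frr_sections_py_alt config_text
instance (config_text : String) (out : List (String × List String)) : Decidable (Spec_parse_frr_sections_py config_text out) := by unfold Spec_parse_frr_sections_py; infer_instance

-- ===== CLAIM (what is proved, stated in full; the proofs are below) =====
def Claim_equal_parse_frr_sections_py : Prop := ∀ (config_text : String), Dom_parse_frr_sections_py config_text → Spec_parse_frr_sections_py config_text (parse_frr_sections_py config_text)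

-- ===== LEMMAS AND PROOFS =====

-- A's loop body, as a function of the already-stripped line
def pvStepS (st : PySem.Dict String (List String) × Option String × List String)
    (stripped : String) : PySem.Dict String (List String) × Option String × List String :=
  if PySem.Str.startswith stripped "hostname " then
    let devices := if pvTruthy st.2.1 && !st.2.2.isEmpty
      then st.1.insert (st.2.1.getD "") st.2.2 else st.1
    (devices, some (pvDevName stripped), [stripped])
  else if stripped != "" && pvTruthy st.2.1 then
    (st.1, st.2.1, st.2.2 ++ [stripped])
  else st

-- A's final flush
def pvFinal (st : PySem.Dict String (List String) × Option String × List String) :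
    List (String × List String) :=
  (if pvTruthy st.2.1 && !st.2.2.isEmpty then st.1.insert (st.2.1.getD "") st.2.2 else st.1).items

lemma parse_frr_eq_fold (config_text : String) :
    parse_frr_sections_py config_text =
      pvFinal (((((PySem.Str.split? config_text "\n").getD []).map PySem.Str.strip).foldl pvStepS
        (PySem.Dict.empty, none, []))) := by
  rw [List.foldl_map]
  rfl

-- unfolding equations for B's loops
lemma pvBlocks_nil (d : PySem.Dict String (List String)) : pvBlocks d [] = d := by
  rw [pvBlocks]

lemma pvBlocks_cons (d : PySem.Dict String (List String)) (s : String) (r : List String) :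
    pvBlocks d (s :: r) =
      pvBlocks (d.insert (pvDevName s) (s :: (pvTakeBody r).1)) (pvTakeBody r).2 := by
  rw [pvBlocks]

lemma pvTakeBody_cons_header {s : String} (r : List String) (h : pvIsHeader s = true) :
    pvTakeBody (s :: r) = ([], s :: r) := by
  simp [pvTakeBody, h]

lemma pvTakeBody_cons_empty {s : String} (r : List String) (h : pvIsHeader s = false)
    (hs : s = "") : pvTakeBody (s :: r) = ((pvTakeBody r).1, (pvTakeBody r).2) := by
  subst hs; simp [pvTakeBody, h]

lemma pvTakeBody_cons_ne {s : String} (r : List String) (h : pvIsHeader s = false)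
    (hs : s ≠ "") : pvTakeBody (s :: r) = (s :: (pvTakeBody r).1, (pvTakeBody r).2) := by
  simp [pvTakeBody, h, hs]

-- s.split(sep, 1) when the nonempty sep is a prefix of s: ["", rest of s]
lemma pvSplitOnMax_one_of_prefix (sep s : List Char) (hne : sep ≠ [])
    (hp : sep.isPrefixOf s = true) :
    PySem.Chars.splitOnMax s sep 1 = [[], s.drop sep.length] := by
  obtain ⟨c, rest, rfl⟩ : ∃ c rest, s = c :: rest := by
    cases s with
    | nil =>
      cases sep with
      | nil => exact absurd rfl hne
      | cons a t => simp [List.isPrefixOf] at hp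
    | cons c rest => exact ⟨c, rest, rfl⟩
  have h1 : PySem.Chars.splitOnMax.go sep (rest.length + 1 + 1) 1 (c :: rest) [] [] =
      PySem.Chars.splitOnMax.go sep (rest.length + 1) 0 ((c :: rest).drop sep.length) [] [[]] := by
    simp [PySem.Chars.splitOnMax.go, hp]
  have h2 : PySem.Chars.splitOnMax.go sep (rest.length + 1) 0 ((c :: rest).drop sep.length) [] [[]] =
      [[], (c :: rest).drop sep.length] := by
    rcases hd : (c :: rest).drop sep.length with _ | ⟨d, ds⟩
    · simp [PySem.Chars.splitOnMax.go]
    · simp [PySem.Chars.splitOnMax.go]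
  unfold PySem.Chars.splitOnMax
  norm_num [h1, h2]

lemma pvDevName_eq (s : String) (h : PySem.Str.startswith s "hostname " = true) :
    pvDevName s = PySem.Str.strip (String.ofList (s.toList.drop 9)) := by
  have hp : ("hostname ".toList).isPrefixOf s.toList = true := by
    simpa [PySem.Str.startswith, PySem.Chars.startswith] using h
  unfold pvDevName
  rw [PySem.Str.splitMax?]
  rw [PySem.Chars.splitMax?]
  rw [if_neg (by decide)]
  rw [pvSplitOnMax_one_of_prefix _ _ (by decide) hp]
  simp [PySem.List.pyGetD, PySem.List.pyGet?, PySem.List.pyIdx?]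

-- head of dropWhile does not satisfy the predicate
lemma pvHead?_dropWhile {p : Char → Bool} :
    ∀ {l : List Char} {a : Char}, (l.dropWhile p).head? = some a → p a = false := by
  intro l
  induction l with
  | nil => intro a h; simp at h
  | cons b r ih =>
    intro a h
    cases hpb : p b with
    | true => rw [List.dropWhile_cons, if_pos hpb] at h; exact ih h
    | false =>
      rw [List.dropWhile_cons, if_neg (by simp [hpb])] at h
      simp only [List.head?_cons, Option.some.injEq] at h
      rw [← h]; exact hpb

-- a stripped string has no trailing whitespace
lemma pvStripL_last {cs : List Char} {c : Char}
    (h : (PySem.Chars.strip cs).reverse.head? = some c) : PySem.Chars.isspace c = false := by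
  unfold PySem.Chars.strip PySem.Chars.rstrip at h
  rw [List.reverse_reverse] at h
  exact pvHead?_dropWhile h

-- strip u = [] means u is all whitespace
lemma pvStrip_eq_nil_all_space {u : List Char} (h : PySem.Chars.strip u = []) :
    ∀ c ∈ u, PySem.Chars.isspace c = true := by
  unfold PySem.Chars.strip PySem.Chars.rstrip PySem.Chars.lstrip at h
  rw [List.reverse_eq_nil_iff, List.dropWhile_eq_nil_iff] at h
  intro c hc
  by_cases hmem : c ∈ List.dropWhile PySem.Chars.isspace u
  · exact h c (List.mem_reverse.mpr hmem)
  · have hsplit : u = u.takeWhile PySem.Chars.isspace ++ u.dropWhile PySem.Chars.isspace :=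
      (List.takeWhile_append_dropWhile).symm
    rw [hsplit] at hc
    rcases List.mem_append.mp hc with htk | hdr
    · exact List.mem_takeWhile_imp htk
    · exact absurd hdr hmem

lemma pvDevName_ne (t : String)
    (hh : PySem.Str.startswith (PySem.Str.strip t) "hostname " = true) :
    pvDevName (PySem.Str.strip t) ≠ "" := by
  have hts : (PySem.Str.strip t).toList = PySem.Chars.strip t.toList := by
    simp [PySem.Str.strip]
  rw [pvDevName_eq _ hh]
  intro hcon
  have hlist : PySem.Chars.strip ((PySem.Str.strip t).toList.drop 9) = [] := by
    have := congrArg String.toList hcon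
    simpa [PySem.Str.strip] using this
  have hp : ("hostname ".toList).isPrefixOf (PySem.Str.strip t).toList = true := by
    simpa [PySem.Str.startswith, PySem.Chars.startswith] using hh
  obtain ⟨u, hu⟩ : ∃ u, (PySem.Str.strip t).toList = "hostname ".toList ++ u := by
    obtain ⟨u, hu⟩ := List.isPrefixOf_iff_prefix.mp hp
    exact ⟨u, hu.symm⟩
  have hdrop : (PySem.Str.strip t).toList.drop 9 = u := by
    rw [hu]; simp
  rw [hdrop] at hlist
  rcases hru : u.reverse with _ | ⟨c, cs⟩
  · -- u = []: the stripped line would end in ' '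
    have hu0 : u = [] := by simpa using congrArg List.reverse hru
    subst hu0
    have hsp : (PySem.Chars.strip t.toList).reverse.head? = some ' ' := by
      rw [← hts, hu]; decide
    have := pvStripL_last hsp
    simp [PySem.Chars.isspace] at this
  · -- u's last char is the stripped line's last char, hence non-space; but strip u = []
    have hc : PySem.Chars.isspace c = false := by
      apply pvStripL_last (cs := t.toList)
      rw [← hts, hu]
      simp [hru]
    have hcu : c ∈ u := by
      have : c ∈ u.reverse := by rw [hru]; exact List.mem_cons_self
      exact List.mem_reverse.mp this
    have := pvStrip_eq_nil_all_space hlist c hcu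
    rw [this] at hc
    exact absurd hc (by simp)

lemma pvFold_some (ss : List String) :
    ∀ (d : PySem.Dict String (List String)) (name : String) (cls : List String),
      (∀ s ∈ ss, ∃ t, s = PySem.Str.strip t) → name ≠ "" → cls ≠ [] →
      pvFinal (ss.foldl pvStepS (d, some name, cls)) =
        (pvBlocks (d.insert name (cls ++ (pvTakeBody ss).1)) (pvTakeBody ss).2).items := by
  induction ss with
  | nil =>
    intro d name cls _ hn hc
    simp [pvFinal, pvTruthy, pvTakeBody, pvBlocks_nil, bne, hn, hc, List.isEmpty_eq_false_iff]
  | cons s r ih =>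
    intro d name cls hmem hn hc
    have hmem' : ∀ x ∈ r, ∃ t, x = PySem.Str.strip t :=
      fun x hx => hmem x (List.mem_cons_of_mem _ hx)
    obtain ⟨t, ht⟩ := hmem s List.mem_cons_self
    have hcond : (pvTruthy (some name) && !cls.isEmpty) = true := by
      simp [pvTruthy, bne_iff_ne, hn, List.isEmpty_eq_false_iff, hc]
    by_cases hhd : PySem.Str.startswith s "hostname " = true
    · have hC : PySem.Chars.startswith s.toList ['h','o','s','t','n','a','m','e',' '] = true := by
        simpa [PySem.Str.startswith] using hhd
      have hname' : pvDevName s ≠ "" := ht ▸ pvDevName_ne t (ht ▸ hhd)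
      have hstep : pvStepS (d, some name, cls) s =
          (d.insert name cls, some (pvDevName s), [s]) := by
        simp [pvStepS, hC, hcond]
      rw [List.foldl_cons, hstep, ih _ _ _ hmem' hname' (by simp),
        pvTakeBody_cons_header r (by simp [pvIsHeader, PySem.Str.startswith, hC]), pvBlocks_cons]
      simp
    · have hC : PySem.Chars.startswith s.toList ['h','o','s','t','n','a','m','e',' '] = false := by
        simpa [PySem.Str.startswith, Bool.not_eq_true] using hhd
      have hhd' : pvIsHeader s = false := by simp [pvIsHeader, PySem.Str.startswith, hC]
      by_cases hs : s = ""
      · have hCe : PySem.Chars.startswith ([] : List Char) ['h','o','s','t','n','a','m','e',' '] = false := by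
          decide
        have hstep : pvStepS (d, some name, cls) s = (d, some name, cls) := by
          simp [pvStepS, hs, hCe]
        rw [List.foldl_cons, hstep, ih _ _ _ hmem' hn hc, pvTakeBody_cons_empty r hhd' hs]
      · have hstep : pvStepS (d, some name, cls) s = (d, some name, cls ++ [s]) := by
          simp [pvStepS, hC, pvTruthy, bne_iff_ne, hs, hn]
        rw [List.foldl_cons, hstep, ih _ _ _ hmem' hn (by simp),
          pvTakeBody_cons_ne r hhd' hs]
        simp

lemma pvFold_none (ss : List String) :
    ∀ (d : PySem.Dict String (List String)) (cls : List String),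
      (∀ s ∈ ss, ∃ t, s = PySem.Str.strip t) →
      pvFinal (ss.foldl pvStepS (d, none, cls)) = (pvBlocks d (pvSkipPre ss)).items := by
  induction ss with
  | nil => intro d cls _; simp [pvFinal, pvTruthy, pvBlocks_nil, pvSkipPre]
  | cons s r ih =>
    intro d cls hmem
    have hmem' : ∀ x ∈ r, ∃ t, x = PySem.Str.strip t :=
      fun x hx => hmem x (List.mem_cons_of_mem _ hx)
    obtain ⟨t, ht⟩ := hmem s List.mem_cons_self
    by_cases hhd : PySem.Str.startswith s "hostname " = true
    · have hC : PySem.Chars.startswith s.toList ['h','o','s','t','n','a','m','e',' '] = true := by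
        simpa [PySem.Str.startswith] using hhd
      have hname' : pvDevName s ≠ "" := ht ▸ pvDevName_ne t (ht ▸ hhd)
      have hstep : pvStepS (d, none, cls) s = (d, some (pvDevName s), [s]) := by
        simp [pvStepS, hC, pvTruthy]
      rw [List.foldl_cons, hstep, pvFold_some _ _ _ _ hmem' hname' (by simp)]
      have : pvSkipPre (s :: r) = s :: r := by
        simp [pvSkipPre, pvIsHeader, PySem.Str.startswith, hC]
      rw [this, pvBlocks_cons]
      simp
    · have hC : PySem.Chars.startswith s.toList ['h','o','s','t','n','a','m','e',' '] = false := by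
        simpa [PySem.Str.startswith, Bool.not_eq_true] using hhd
      have hstep : pvStepS (d, none, cls) s = (d, none, cls) := by
        simp [pvStepS, hC, pvTruthy]
      rw [List.foldl_cons, hstep, ih _ _ hmem']
      have : pvSkipPre (s :: r) = pvSkipPre r := by
        simp [pvSkipPre, pvIsHeader, PySem.Str.startswith, hC]
      rw [this]

-- ===== VERDICT (by name: the statement is the Claim_ definition above) =====
theorem parse_frr_sections_py_spec : Claim_equal_parse_frr_sections_py := by
  intro config_text _
  unfold Spec_parse_frr_sections_py
  rw [parse_frr_eq_fold, parse_frr_sections_py_alt]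
  exact pvFold_none _ _ _ (by
    intro s hs
    obtain ⟨t, _, ht⟩ := List.mem_map.mp hs
    exact ⟨t, ht.symm⟩)
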